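-- pv_equiv track=rewrite | github.com/MarcellyHuastein/desenvolve-python-basico | python/modulo 6/aula3questão3.py | encontrar_intervalo_maior_negativos
-- ===== SOURCE A (Python) =====
-- def encontrar_intervalo_maior_negativos(lista):
--     max_negativos = 0
--     melhor_inicio = 0
--     melhor_fim = 0
--
--     n = len(lista)
--
--     for i in range(n):
--         for j in range(i + 1, n + 1):
--             sublista = lista[i:j]
--             num_negativos = sum(1 for x in sublista if x < 0)
--             if num_negativos > max_negativos:
--                 max_negativos = num_negativos
--                 melhor_inicio = i
--                 melhor_fim = j
--
--     return melhor_inicio, melhor_fim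
-- ===== SOURCE B (Python) =====
-- def encontrar_intervalo_maior_negativos(lista):
--     # The whole-list interval contains every negative, and A's lexicographic
--     # scan first reaches that maximum at i=0, j=last_negative_index+1.
--     ultimo = -1
--     for i, x in enumerate(lista):
--         if x < 0:
--             ultimo = i
--     return 0, ultimo + 1
-- ===== Notes on version B (the rewrite author's own statement) =====
-- stated objective: faster
-- what changed: Replaces the O(n^3) scan over all subarrays with a single pass recording the index of the last negative element, since the maximal negative count is first attained by the prefix ending just after the last negative.
import Mathlib
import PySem

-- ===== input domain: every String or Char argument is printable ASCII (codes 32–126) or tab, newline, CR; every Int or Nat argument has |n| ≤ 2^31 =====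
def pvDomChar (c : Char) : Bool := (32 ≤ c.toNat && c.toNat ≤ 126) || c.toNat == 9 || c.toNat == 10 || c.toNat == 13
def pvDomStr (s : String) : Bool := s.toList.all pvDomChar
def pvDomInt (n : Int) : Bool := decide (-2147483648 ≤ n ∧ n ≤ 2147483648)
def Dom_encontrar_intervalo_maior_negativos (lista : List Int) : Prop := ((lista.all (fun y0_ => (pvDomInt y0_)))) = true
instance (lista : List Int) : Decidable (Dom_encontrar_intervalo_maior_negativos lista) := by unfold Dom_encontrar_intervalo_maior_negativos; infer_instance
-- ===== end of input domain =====

-- B replaces A's O(n^3) scan over all subarrays by a single pass that records the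
-- index of the last negative element (objective: faster, asymptotic).

-- ===== PORT A =====
-- sum(1 for x in sublista if x < 0)
def pvCountNeg (sublista : List Int) : Int :=
  sublista.foldl (fun acc x => if x < 0 then acc + 1 else acc) 0

-- body of the inner 'for j' loop; state s = (max_negativos, melhor_inicio, melhor_fim)
def pvStepA (lista : List Int) (i : Int) (s : Int × Int × Int) (j : Int) : Int × Int × Int :=
  let sublista := PySem.List.slice lista (some i) (some j)
  let num_negativos := pvCountNeg sublista
  if num_negativos > s.1 then (num_negativos, i, j) else s

-- the inner 'for j in range(i+1, n+1)' loop
def pvInnerA (lista : List Int) (n : Int) (s : Int × Int × Int) (i : Int) : Int × Int × Int :=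
  (PySem.List.pyRange (i + 1) (n + 1) 1).foldl (pvStepA lista i) s

def encontrar_intervalo_maior_negativos (lista : List Int) : List Int :=
  let n : Int := lista.length
  let st := (PySem.List.pyRange 0 n 1).foldl (pvInnerA lista n) (0, 0, 0)
  [st.2.1, st.2.2]

-- ===== PORT B =====
-- index of the last negative element, -1 if none (the 'for i, x in enumerate(lista)' loop)
def pvUltimo (lista : List Int) : Int :=
  (PySem.List.enumerate lista 0).foldl (fun u p => if p.2 < 0 then p.1 else u) (-1)

def encontrar_intervalo_maior_negativos_alt (lista : List Int) : List Int :=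
  [0, pvUltimo lista + 1]

-- ===== PRECONDITION & SPEC =====
def Spec_encontrar_intervalo_maior_negativos (lista : List Int) (out : List Int) : Prop := out = encontrar_intervalo_maior_negativos_alt lista
instance (lista : List Int) (out : List Int) : Decidable (Spec_encontrar_intervalo_maior_negativos lista out) := by unfold Spec_encontrar_intervalo_maior_negativos; infer_instance

-- ===== CLAIM (what is proved, stated in full; the proofs are below) =====
def Claim_equal_encontrar_intervalo_maior_negativos : Prop := ∀ (lista : List Int), Dom_encontrar_intervalo_maior_negativos lista → Spec_encontrar_intervalo_maior_negativos lista (encontrar_intervalo_maior_negativos lista)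

-- ===== LEMMAS AND PROOFS =====

-- count of negatives, as the Int the port computes
def cntNeg (l : List Int) : Int := (l.countP (fun x => decide (x < 0)) : Int)

theorem pvCountNeg_eq (l : List Int) : pvCountNeg l = cntNeg l := by
  unfold pvCountNeg cntNeg
  rw [PySem.List.foldl_ite_add_one (p := fun x => x < 0)]
  simp

theorem cntNeg_nonneg (l : List Int) : 0 ≤ cntNeg l := by
  unfold cntNeg; positivity

theorem cntNeg_append_singleton (l : List Int) (x : Int) :
    cntNeg (l ++ [x]) = cntNeg l + (if x < 0 then 1 else 0) := by
  unfold cntNeg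
  simp [List.countP_append, List.countP_cons]

-- any slice is a sublist, so it has no more negatives than the whole list
theorem cntNeg_slice_le (l : List Int) (a b : Int) :
    cntNeg (PySem.List.slice l (some a) (some b)) ≤ cntNeg l := by
  have hsub : (PySem.List.slice l (some a) (some b)).Sublist l := by
    unfold PySem.List.slice
    simp only []
    exact ((l.drop _).take_sublist _).trans (l.drop_sublist _)
  unfold cntNeg
  exact_mod_cast hsub.countP_le

-- pvUltimo of a snoc
theorem pvUltimo_append_singleton (l : List Int) (x : Int) :
    pvUltimo (l ++ [x]) = if x < 0 then (l.length : Int) else pvUltimo l := by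
  unfold pvUltimo
  rw [PySem.List.enumerate_append, List.foldl_append]
  simp [PySem.List.enumerate_cons]

theorem pvUltimo_eq_neg_one_of_cntNeg_zero (l : List Int) (h : cntNeg l = 0) :
    pvUltimo l = -1 := by
  induction l using List.reverseRecOn with
  | nil => rfl
  | append_singleton t x ih =>
    rw [cntNeg_append_singleton] at h
    have ht := cntNeg_nonneg t
    rw [pvUltimo_append_singleton]
    split_ifs with hx
    · simp [hx] at h; omega
    · exact ih (by simp [hx] at h; omega)

-- a fold whose step fixes the state is the identity
theorem foldl_id_of_mem {α β : Type} (f : β → α → β) (s : β) (js : List α)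
    (h : ∀ j ∈ js, f s j = s) : js.foldl f s = s := by
  induction js with
  | nil => rfl
  | cons j t ih =>
    simp only [List.foldl_cons, h j (by simp)]
    exact ih (fun j' hj' => h j' (by simp [hj']))

-- the state the i = 0 pass reaches after scanning j = 1 .. k
def pvState0 (lista : List Int) (k : Nat) : Int × Int × Int :=
  (cntNeg (lista.take k), 0,
   if cntNeg (lista.take k) = 0 then 0 else pvUltimo (lista.take k) + 1)

theorem pvState0_succ (lista : List Int) (k : Nat) (hklt : k < lista.length) :
    pvState0 lista (k + 1)
      = if lista[k] < 0 then (cntNeg (lista.take k) + 1, 0, (k : Int) + 1)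
        else pvState0 lista k := by
  have htake : lista.take (k + 1) = lista.take k ++ [lista[k]] := by
    rw [List.take_add_one]; simp [List.getElem?_eq_getElem hklt]
  have hlen : ((lista.take k).length : Int) = (k : Int) := by
    simp [List.length_take, Nat.min_eq_left (le_of_lt hklt)]
  have h0 := cntNeg_nonneg (lista.take k)
  unfold pvState0
  rw [htake, cntNeg_append_singleton, pvUltimo_append_singleton, hlen]
  by_cases hx : lista[k] < 0
  · simp only [hx, if_true]
    rw [if_neg (by omega)]
  · simp only [hx, if_false, add_zero]

theorem inner0_eq (lista : List Int) (k : Nat) (hk : k ≤ lista.length) :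
    (PySem.List.pyRange 1 ((k : Int) + 1) 1).foldl (pvStepA lista 0) (0, 0, 0)
      = pvState0 lista k := by
  induction k with
  | zero =>
    rw [show ((0 : Nat) : Int) + 1 = 1 by simp, PySem.List.pyRange_one_eq_nil le_rfl]
    simp [pvState0, cntNeg]
  | succ k ih =>
    have hk' : k ≤ lista.length := by omega
    have hklt : k < lista.length := by omega
    rw [show ((k + 1 : Nat) : Int) + 1 = ((k : Int) + 1) + 1 by push_cast; ring,
        PySem.List.pyRange_one_succ_right (by omega), List.foldl_append,
        ih hk']
    have hslice : PySem.List.slice lista (some 0) (some ((k : Int) + 1))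
        = lista.take (k + 1) := by
      rw [show ((k : Int) + 1) = ((k + 1 : Nat) : Int) by push_cast; ring,
          PySem.List.slice_zero_start, PySem.List.slice_to_natCast]
    have htake : lista.take (k + 1) = lista.take k ++ [lista[k]] := by
      rw [List.take_add_one]; simp [List.getElem?_eq_getElem hklt]
    simp only [List.foldl_cons, List.foldl_nil, pvStepA, hslice, pvCountNeg_eq]
    rw [htake, cntNeg_append_singleton, pvState0_succ lista k hklt]
    have h1 : (pvState0 lista k).1 = cntNeg (lista.take k) := rfl
    rw [h1]
    by_cases hx : lista[k] < 0
    · simp only [hx, if_true]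
      rw [if_pos (by omega)]
    · simp only [hx, if_false, add_zero]
      rw [if_neg (by omega)]

-- once the maximum (= total negative count) is in the state, nothing updates it
theorem inner_fixed (lista : List Int) (n : Int) (s : Int × Int × Int)
    (hs : s.1 = cntNeg lista) (i : Int) : pvInnerA lista n s i = s := by
  unfold pvInnerA
  apply foldl_id_of_mem
  intro j _
  unfold pvStepA
  simp only [pvCountNeg_eq]
  rw [if_neg]
  have := cntNeg_slice_le lista i j
  omega

-- ===== VERDICT (by name: the statement is the Claim_ definition above) =====
theorem encontrar_intervalo_maior_negativos_spec : Claim_equal_encontrar_intervalo_maior_negativos := by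
  intro lista _
  unfold Spec_encontrar_intervalo_maior_negativos
  unfold encontrar_intervalo_maior_negativos encontrar_intervalo_maior_negativos_alt
  by_cases hnil : lista = []
  · subst hnil; rfl
  · have hlen : 0 < lista.length := List.length_pos_iff.mpr hnil
    simp only []
    rw [PySem.List.pyRange_one_cons (by exact_mod_cast hlen), List.foldl_cons]
    have h0 : pvInnerA lista (lista.length : Int) (0, 0, 0) 0 = pvState0 lista lista.length := by
      unfold pvInnerA
      rw [show ((0:Int) + 1) = 1 by ring]
      exact inner0_eq lista lista.length le_rfl
    rw [h0]
    rw [foldl_id_of_mem _ _ _ (fun i _ => inner_fixed lista _ _ (by simp [pvState0]) i)]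
    unfold pvState0
    rw [List.take_length]
    by_cases hz : cntNeg lista = 0
    · simp only [hz, if_pos]
      rw [pvUltimo_eq_neg_one_of_cntNeg_zero lista hz]
      norm_num
    · simp [hz]
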